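-- pv_equiv track=rewrite | github.com/AtilioA/Python-20191 | lista7jordana/Ex062.py | intervalo
-- ===== SOURCE A (Python) =====
-- def intervalo(listaOrdenada, limInferior, limSuperior):
--     if not listaOrdenada:
--         return []
--     elif listaOrdenada[0] >= limInferior and listaOrdenada[0] <= limSuperior:
--         return [listaOrdenada[0]] + \
--             intervalo(listaOrdenada[1:], limInferior, limSuperior)
--     else:
--         return intervalo(listaOrdenada[1:], limInferior, limSuperior)
-- ===== SOURCE B (Python) =====
-- def intervalo(listaOrdenada, limInferior, limSuperior):
--     return [x for x in listaOrdenada if limInferior <= x <= limSuperior]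
-- ===== Notes on version B (the rewrite author's own statement) =====
-- stated objective: idiomatic
-- what changed: Replaced A's recursion with repeated list slicing (each step copies the tail) by a single-pass list comprehension filter.
import Mathlib
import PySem

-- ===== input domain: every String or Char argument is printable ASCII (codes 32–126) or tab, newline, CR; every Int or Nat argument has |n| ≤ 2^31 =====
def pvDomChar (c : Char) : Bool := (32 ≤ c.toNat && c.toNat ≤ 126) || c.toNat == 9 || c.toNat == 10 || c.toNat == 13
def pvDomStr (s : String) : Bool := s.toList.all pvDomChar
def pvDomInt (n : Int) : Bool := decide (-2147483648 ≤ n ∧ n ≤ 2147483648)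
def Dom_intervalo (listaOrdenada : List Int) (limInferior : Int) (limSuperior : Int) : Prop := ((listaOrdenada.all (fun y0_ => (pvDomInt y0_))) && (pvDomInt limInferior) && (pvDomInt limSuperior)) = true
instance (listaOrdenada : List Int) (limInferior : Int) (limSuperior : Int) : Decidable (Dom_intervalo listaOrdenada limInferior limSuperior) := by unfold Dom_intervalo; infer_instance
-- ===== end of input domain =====

-- ===== PORT A =====
-- B replaces A's recursion-with-slicing by a single-pass filter; return value only, proved equal on Dom.
def intervalo (listaOrdenada : List Int) (limInferior : Int) (limSuperior : Int) : List Int :=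
  match listaOrdenada with
  | [] => []
  | x :: rest =>
    if x ≥ limInferior ∧ x ≤ limSuperior then
      [x] ++ intervalo rest limInferior limSuperior
    else
      intervalo rest limInferior limSuperior


-- ===== PORT B =====
def intervalo_alt (listaOrdenada : List Int) (limInferior : Int) (limSuperior : Int) : List Int :=
  listaOrdenada.filter (fun x => limInferior ≤ x ∧ x ≤ limSuperior)


-- ===== PRECONDITION & SPEC =====
def Spec_intervalo (listaOrdenada : List Int) (limInferior : Int) (limSuperior : Int) (out : List Int) : Prop := out = intervalo_alt listaOrdenada limInferior limSuperior
instance (listaOrdenada : List Int) (limInferior : Int) (limSuperior : Int) (out : List Int) : Decidable (Spec_intervalo listaOrdenada limInferior limSuperior out) := by unfold Spec_intervalo; infer_instance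

-- ===== CLAIM (what is proved, stated in full; the proofs are below) =====
def Claim_equal_intervalo : Prop := ∀ (listaOrdenada : List Int) (limInferior : Int) (limSuperior : Int), Dom_intervalo listaOrdenada limInferior limSuperior → Spec_intervalo listaOrdenada limInferior limSuperior (intervalo listaOrdenada limInferior limSuperior)

-- ===== LEMMAS AND PROOFS =====

-- ===== VERDICT (by name: the statement is the Claim_ definition above) =====
theorem intervalo_eq (l : List Int) (lo hi : Int) :
    intervalo l lo hi = intervalo_alt l lo hi := by
  induction l with
  | nil => rfl
  | cons x rest ih =>
    simp only [intervalo, intervalo_alt, List.filter_cons]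
    by_cases h : lo ≤ x ∧ x ≤ hi
    · simp only [ge_iff_le, and_comm] at *
      simp [h, ih, intervalo_alt]
    · simp only [ge_iff_le] at *
      simp [h, ih, intervalo_alt]

theorem intervalo_spec : Claim_equal_intervalo := by
  intro l lo hi _
  unfold Spec_intervalo
  exact intervalo_eq l lo hi
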